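-- pv_equiv track=rewrite | github.com/ilmych/incept-timeback-plugin | skills/timeback/scripts/sanitize_html.py | html_entities_to_unicode
-- ===== SOURCE A (Python) =====
-- def html_entities_to_unicode(html: str) -> str:
--     """Replace HTML named entities with Unicode (XML only supports 5 named entities)."""
--     replacements = {
--         '&mdash;': '\u2014', '&ndash;': '\u2013', '&rarr;': '\u2192',
--         '&larr;': '\u2190', '&harr;': '\u2194', '&Delta;': '\u0394',
--         '&delta;': '\u03B4', '&deg;': '\u00B0', '&micro;': '\u00B5',
--         '&pi;': '\u03C0', '&sigma;': '\u03C3', '&alpha;': '\u03B1',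
--         '&beta;': '\u03B2', '&gamma;': '\u03B3', '&lambda;': '\u03BB',
--         '&theta;': '\u03B8', '&omega;': '\u03C9', '&infin;': '\u221E',
--         '&ge;': '\u2265', '&le;': '\u2264', '&ne;': '\u2260',
--         '&asymp;': '\u2248', '&plusmn;': '\u00B1', '&times;': '\u00D7',
--         '&divide;': '\u00F7', '&raquo;': '\u00BB', '&laquo;': '\u00AB',
--         '&bull;': '\u2022', '&hellip;': '\u2026', '&trade;': '\u2122',
--         '&copy;': '\u00A9', '&reg;': '\u00AE', '&nbsp;': '\u00A0',
--         '&lsquo;': '\u2018', '&rsquo;': '\u2019',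
--         '&ldquo;': '\u201C', '&rdquo;': '\u201D',
--         '&prime;': '\u2032', '&Prime;': '\u2033',
--         '&sum;': '\u2211', '&prod;': '\u220F',
--         '&int;': '\u222B', '&part;': '\u2202',
--         '&nabla;': '\u2207', '&forall;': '\u2200',
--         '&exist;': '\u2203', '&isin;': '\u2208',
--         '&sub;': '\u2282', '&sup;': '\u2283',
--         '&cup;': '\u222A', '&cap;': '\u2229',
--         '&empty;': '\u2205', '&equiv;': '\u2261',
--     }
--     for entity, char in replacements.items():
--         html = html.replace(entity, char)
--     return html
-- ===== SOURCE B (Python) =====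
-- def html_entities_to_unicode(html: str) -> str:
--     """Replace HTML named entities with Unicode (XML only supports 5 named entities)."""
--     replacements = {
--         '&mdash;': '\u2014', '&ndash;': '\u2013', '&rarr;': '\u2192',
--         '&larr;': '\u2190', '&harr;': '\u2194', '&Delta;': '\u0394',
--         '&delta;': '\u03B4', '&deg;': '\u00B0', '&micro;': '\u00B5',
--         '&pi;': '\u03C0', '&sigma;': '\u03C3', '&alpha;': '\u03B1',
--         '&beta;': '\u03B2', '&gamma;': '\u03B3', '&lambda;': '\u03BB',
--         '&theta;': '\u03B8', '&omega;': '\u03C9', '&infin;': '\u221E',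
--         '&ge;': '\u2265', '&le;': '\u2264', '&ne;': '\u2260',
--         '&asymp;': '\u2248', '&plusmn;': '\u00B1', '&times;': '\u00D7',
--         '&divide;': '\u00F7', '&raquo;': '\u00BB', '&laquo;': '\u00AB',
--         '&bull;': '\u2022', '&hellip;': '\u2026', '&trade;': '\u2122',
--         '&copy;': '\u00A9', '&reg;': '\u00AE', '&nbsp;': '\u00A0',
--         '&lsquo;': '\u2018', '&rsquo;': '\u2019',
--         '&ldquo;': '\u201C', '&rdquo;': '\u201D',
--         '&prime;': '\u2032', '&Prime;': '\u2033',
--         '&sum;': '\u2211', '&prod;': '\u220F',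
--         '&int;': '\u222B', '&part;': '\u2202',
--         '&nabla;': '\u2207', '&forall;': '\u2200',
--         '&exist;': '\u2203', '&isin;': '\u2208',
--         '&sub;': '\u2282', '&sup;': '\u2283',
--         '&cup;': '\u222A', '&cap;': '\u2229',
--         '&empty;': '\u2205', '&equiv;': '\u2261',
--     }
--     # One left-to-right pass: at each position take the (unique) entity that
--     # starts there, otherwise copy the character.  Equivalent to the 53
--     # sequential full-string replaces because no entity is a prefix of another
--     # and no replacement character can create or destroy an entity occurrence.
--     out = []
--     i = 0
--     n = len(html)
--     while i < n:
--         for entity, char in replacements.items():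
--             if html.startswith(entity, i):
--                 out.append(char)
--                 i += len(entity)
--                 break
--         else:
--             out.append(html[i])
--             i += 1
--     return ''.join(out)
-- ===== Notes on version B (the rewrite author's own statement) =====
-- stated objective: alternative
-- what changed: A runs 53 sequential full-string str.replace passes (each allocating a new string); B makes one left-to-right scan that at each position emits the unique matching entity's replacement or copies the character, which is valid because no entity is a prefix of another and replacement characters cannot create new entity occurrences.
import Mathlib
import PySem

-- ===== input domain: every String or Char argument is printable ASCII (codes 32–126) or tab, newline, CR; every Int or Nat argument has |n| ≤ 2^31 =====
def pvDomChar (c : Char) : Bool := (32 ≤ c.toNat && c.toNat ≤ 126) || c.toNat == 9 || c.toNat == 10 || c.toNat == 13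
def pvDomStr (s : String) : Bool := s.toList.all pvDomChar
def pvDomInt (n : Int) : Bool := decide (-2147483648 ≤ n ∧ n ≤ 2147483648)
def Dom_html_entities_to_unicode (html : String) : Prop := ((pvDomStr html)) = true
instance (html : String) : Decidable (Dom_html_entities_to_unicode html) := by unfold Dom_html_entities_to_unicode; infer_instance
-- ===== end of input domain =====

-- B replaces A's 53 sequential full-string `str.replace` passes by ONE left-to-right scan that,
-- at each position, emits the entity match (or copies the character); same value everywhere.

-- ===== PORT A =====
-- A's dict literal of entity → replacement (insertion order), as in the Python source.
def pvReplacements : PySem.Dict String String := PySem.Dict.mk [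
    ("&mdash;", "\u2014"),
    ("&ndash;", "\u2013"),
    ("&rarr;", "\u2192"),
    ("&larr;", "\u2190"),
    ("&harr;", "\u2194"),
    ("&Delta;", "\u0394"),
    ("&delta;", "\u03B4"),
    ("&deg;", "\u00B0"),
    ("&micro;", "\u00B5"),
    ("&pi;", "\u03C0"),
    ("&sigma;", "\u03C3"),
    ("&alpha;", "\u03B1"),
    ("&beta;", "\u03B2"),
    ("&gamma;", "\u03B3"),
    ("&lambda;", "\u03BB"),
    ("&theta;", "\u03B8"),
    ("&omega;", "\u03C9"),
    ("&infin;", "\u221E"),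
    ("&ge;", "\u2265"),
    ("&le;", "\u2264"),
    ("&ne;", "\u2260"),
    ("&asymp;", "\u2248"),
    ("&plusmn;", "\u00B1"),
    ("&times;", "\u00D7"),
    ("&divide;", "\u00F7"),
    ("&raquo;", "\u00BB"),
    ("&laquo;", "\u00AB"),
    ("&bull;", "\u2022"),
    ("&hellip;", "\u2026"),
    ("&trade;", "\u2122"),
    ("&copy;", "\u00A9"),
    ("&reg;", "\u00AE"),
    ("&nbsp;", "\u00A0"),
    ("&lsquo;", "\u2018"),
    ("&rsquo;", "\u2019"),
    ("&ldquo;", "\u201C"),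
    ("&rdquo;", "\u201D"),
    ("&prime;", "\u2032"),
    ("&Prime;", "\u2033"),
    ("&sum;", "\u2211"),
    ("&prod;", "\u220F"),
    ("&int;", "\u222B"),
    ("&part;", "\u2202"),
    ("&nabla;", "\u2207"),
    ("&forall;", "\u2200"),
    ("&exist;", "\u2203"),
    ("&isin;", "\u2208"),
    ("&sub;", "\u2282"),
    ("&sup;", "\u2283"),
    ("&cup;", "\u222A"),
    ("&cap;", "\u2229"),
    ("&empty;", "\u2205"),
    ("&equiv;", "\u2261")]

-- A: for entity, char in replacements.items(): html = html.replace(entity, char)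
def html_entities_to_unicode (html : String) : String :=
  pvReplacements.items.foldl (fun s p => PySem.Str.replace s p.1 p.2) html

-- ===== PORT B =====
-- B's same replacements dict, as its items list at the code-point level (entity chars, replacement chars).
def pvTable : List (List Char × List Char) := [
    (['&', 'm', 'd', 'a', 's', 'h', ';'], ['\u2014']),
    (['&', 'n', 'd', 'a', 's', 'h', ';'], ['\u2013']),
    (['&', 'r', 'a', 'r', 'r', ';'], ['\u2192']),
    (['&', 'l', 'a', 'r', 'r', ';'], ['\u2190']),
    (['&', 'h', 'a', 'r', 'r', ';'], ['\u2194']),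
    (['&', 'D', 'e', 'l', 't', 'a', ';'], ['\u0394']),
    (['&', 'd', 'e', 'l', 't', 'a', ';'], ['\u03B4']),
    (['&', 'd', 'e', 'g', ';'], ['\u00B0']),
    (['&', 'm', 'i', 'c', 'r', 'o', ';'], ['\u00B5']),
    (['&', 'p', 'i', ';'], ['\u03C0']),
    (['&', 's', 'i', 'g', 'm', 'a', ';'], ['\u03C3']),
    (['&', 'a', 'l', 'p', 'h', 'a', ';'], ['\u03B1']),
    (['&', 'b', 'e', 't', 'a', ';'], ['\u03B2']),
    (['&', 'g', 'a', 'm', 'm', 'a', ';'], ['\u03B3']),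
    (['&', 'l', 'a', 'm', 'b', 'd', 'a', ';'], ['\u03BB']),
    (['&', 't', 'h', 'e', 't', 'a', ';'], ['\u03B8']),
    (['&', 'o', 'm', 'e', 'g', 'a', ';'], ['\u03C9']),
    (['&', 'i', 'n', 'f', 'i', 'n', ';'], ['\u221E']),
    (['&', 'g', 'e', ';'], ['\u2265']),
    (['&', 'l', 'e', ';'], ['\u2264']),
    (['&', 'n', 'e', ';'], ['\u2260']),
    (['&', 'a', 's', 'y', 'm', 'p', ';'], ['\u2248']),
    (['&', 'p', 'l', 'u', 's', 'm', 'n', ';'], ['\u00B1']),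
    (['&', 't', 'i', 'm', 'e', 's', ';'], ['\u00D7']),
    (['&', 'd', 'i', 'v', 'i', 'd', 'e', ';'], ['\u00F7']),
    (['&', 'r', 'a', 'q', 'u', 'o', ';'], ['\u00BB']),
    (['&', 'l', 'a', 'q', 'u', 'o', ';'], ['\u00AB']),
    (['&', 'b', 'u', 'l', 'l', ';'], ['\u2022']),
    (['&', 'h', 'e', 'l', 'l', 'i', 'p', ';'], ['\u2026']),
    (['&', 't', 'r', 'a', 'd', 'e', ';'], ['\u2122']),
    (['&', 'c', 'o', 'p', 'y', ';'], ['\u00A9']),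
    (['&', 'r', 'e', 'g', ';'], ['\u00AE']),
    (['&', 'n', 'b', 's', 'p', ';'], ['\u00A0']),
    (['&', 'l', 's', 'q', 'u', 'o', ';'], ['\u2018']),
    (['&', 'r', 's', 'q', 'u', 'o', ';'], ['\u2019']),
    (['&', 'l', 'd', 'q', 'u', 'o', ';'], ['\u201C']),
    (['&', 'r', 'd', 'q', 'u', 'o', ';'], ['\u201D']),
    (['&', 'p', 'r', 'i', 'm', 'e', ';'], ['\u2032']),
    (['&', 'P', 'r', 'i', 'm', 'e', ';'], ['\u2033']),
    (['&', 's', 'u', 'm', ';'], ['\u2211']),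
    (['&', 'p', 'r', 'o', 'd', ';'], ['\u220F']),
    (['&', 'i', 'n', 't', ';'], ['\u222B']),
    (['&', 'p', 'a', 'r', 't', ';'], ['\u2202']),
    (['&', 'n', 'a', 'b', 'l', 'a', ';'], ['\u2207']),
    (['&', 'f', 'o', 'r', 'a', 'l', 'l', ';'], ['\u2200']),
    (['&', 'e', 'x', 'i', 's', 't', ';'], ['\u2203']),
    (['&', 'i', 's', 'i', 'n', ';'], ['\u2208']),
    (['&', 's', 'u', 'b', ';'], ['\u2282']),
    (['&', 's', 'u', 'p', ';'], ['\u2283']),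
    (['&', 'c', 'u', 'p', ';'], ['\u222A']),
    (['&', 'c', 'a', 'p', ';'], ['\u2229']),
    (['&', 'e', 'm', 'p', 't', 'y', ';'], ['\u2205']),
    (['&', 'e', 'q', 'u', 'i', 'v', ';'], ['\u2261'])]

-- B's while-loop over positions: the inner `for entity, char … break / else` is the first table
-- entry whose entity starts at the current position (`List.find?`); on a match emit the replacement
-- and advance by the entity's length, otherwise copy one character.  (The `p.1.length ≤ 1` branch
-- only makes the recursion total for a hypothetical empty entity; it agrees with `drop` for length 1,
-- and every real entity has length ≥ 3.)
def pvScan (T : List (List Char × List Char)) : List Char → List Char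
  | [] => []
  | c :: t =>
    match T.find? (fun p => p.1.isPrefixOf (c :: t)) with
    | some p => if p.1.length ≤ 1 then p.2 ++ pvScan T t
                else p.2 ++ pvScan T (List.drop p.1.length (c :: t))
    | none => c :: pvScan T t
termination_by l => l.length
decreasing_by
  · simp
  · simp; omega

def html_entities_to_unicode_alt (html : String) : String :=
  String.ofList (pvScan pvTable html.toList)

-- ===== PRECONDITION & SPEC =====
def Spec_html_entities_to_unicode (html : String) (out : String) : Prop := out = html_entities_to_unicode_alt html
instance (html : String) (out : String) : Decidable (Spec_html_entities_to_unicode html out) := by unfold Spec_html_entities_to_unicode; infer_instance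

-- ===== CLAIM (what is proved, stated in full; the proofs are below) =====
def Claim_equal_html_entities_to_unicode : Prop := ∀ (html : String), Dom_html_entities_to_unicode html → Spec_html_entities_to_unicode html (html_entities_to_unicode html)

-- ===== LEMMAS AND PROOFS =====

-- The shape of the table that makes 53 sequential replaces equal to one scan:
-- every entity is nonempty, starts with '&' and has no further '&'; every replacement is nonempty
-- and shares no character with any entity; distinct entities are never prefixes of one another.
def pvGoodTable (T : List (List Char × List Char)) : Prop :=
  (∀ pv ∈ T, pv.1 ≠ [] ∧ pv.1.head? = some '&' ∧ '&' ∉ pv.1.tail ∧ pv.2 ≠ [] ∧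
      ∀ c ∈ pv.2, ∀ qw ∈ T, c ∉ qw.1) ∧
  (∀ pv ∈ T, ∀ qw ∈ T, pv.1 <+: qw.1 → pv.1 = qw.1)

-- Boolean form, so the 53-entry concrete table can be checked by kernel evaluation.
def pvGoodTableB (T : List (List Char × List Char)) : Bool :=
  (T.all fun pv => (!pv.1.isEmpty) && (pv.1.head? == some '&') && (!pv.1.tail.contains '&') &&
      (!pv.2.isEmpty) && (pv.2.all fun c => T.all fun qw => !(qw.1.contains c))) &&
  (T.all fun pv => T.all fun qw => (!(pv.1.isPrefixOf qw.1)) || pv.1 == qw.1)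

theorem pvGoodTable_of_bool (T : List (List Char × List Char)) (h : pvGoodTableB T = true) :
    pvGoodTable T := by
  unfold pvGoodTable
  simp only [pvGoodTableB, List.contains_eq_mem, Bool.and_eq_true, List.all_eq_true,
    Bool.not_eq_eq_eq_not, Bool.not_true, List.isEmpty_eq_false_iff, ne_eq, beq_iff_eq,
    decide_eq_false_iff_not, Bool.or_eq_true] at h
  obtain ⟨h1, h2⟩ := h
  constructor
  · intro pv hpv
    obtain ⟨⟨⟨⟨a, b⟩, c⟩, d⟩, e⟩ := h1 pv hpv
    exact ⟨a, b, c, d, fun ch hch qw hqw => e ch hch qw hqw⟩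
  · intro pv hpv qw hqw hpre
    rcases h2 pv hpv qw hqw with hc | hc
    · exact absurd (List.isPrefixOf_iff_prefix.mpr hpre) (by simp [hc])
    · exact hc

set_option maxRecDepth 10000 in
theorem pvGoodTable_pvTable : pvGoodTable pvTable :=
  pvGoodTable_of_bool pvTable (by decide)

theorem pvGoodTable_tail (t : List Char × List Char) (R : List (List Char × List Char))
    (h : pvGoodTable (t :: R)) : pvGoodTable R := by
  obtain ⟨h1, h2⟩ := h
  refine ⟨fun pv hpv => ?_, fun pv hpv qw hqw =>
    h2 pv (List.mem_cons_of_mem _ hpv) qw (List.mem_cons_of_mem _ hqw)⟩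
  obtain ⟨a, b, c, d, e⟩ := h1 pv (List.mem_cons_of_mem _ hpv)
  exact ⟨a, b, c, d, fun ch hch qw hqw => e ch hch qw (List.mem_cons_of_mem _ hqw)⟩

theorem pvScan_nil (T : List (List Char × List Char)) : pvScan T [] = [] := by rw [pvScan]

theorem pvScan_cons_none (T : List (List Char × List Char)) (c : Char) (t : List Char)
    (h : T.find? (fun p => p.1.isPrefixOf (c :: t)) = none) :
    pvScan T (c :: t) = c :: pvScan T t := by
  rw [pvScan, h]

theorem pvScan_cons_some (T : List (List Char × List Char)) (c : Char) (t : List Char)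
    (p : List Char × List Char) (h : T.find? (fun p => p.1.isPrefixOf (c :: t)) = some p)
    (hp : p.1 ≠ []) :
    pvScan T (c :: t) = p.2 ++ pvScan T (List.drop p.1.length (c :: t)) := by
  rw [pvScan, h]
  by_cases hlen : p.1.length ≤ 1
  · have h1 : p.1.length = 1 := by
      have : p.1.length ≠ 0 := by simpa using hp
      omega
    simp [h1]
  · simp [hlen]

theorem pvScan_some (T : List (List Char × List Char)) (l : List Char)
    (p : List Char × List Char) (hl : l ≠ [])
    (h : T.find? (fun p => p.1.isPrefixOf l) = some p) (hp : p.1 ≠ []) :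
    pvScan T l = p.2 ++ pvScan T (List.drop p.1.length l) := by
  cases l with
  | nil => exact absurd rfl hl
  | cons c t => exact pvScan_cons_some T c t p h hp

theorem pvScan_nil_table (l : List Char) : pvScan [] l = l := by
  induction l with
  | nil => exact pvScan_nil []
  | cons c t ih => rw [pvScan_cons_none [] c t (by simp), ih]

-- find? on a singleton table is the prefix test.
theorem find?_singleton_pos (old new l : List Char) (h : old <+: l) :
    [(old, new)].find? (fun p => p.1.isPrefixOf l) = some (old, new) :=
  List.find?_cons_of_pos (by simpa [List.isPrefixOf_iff_prefix] using h)

theorem find?_singleton_neg (old new l : List Char) (h : ¬ old <+: l) :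
    [(old, new)].find? (fun p => p.1.isPrefixOf l) = none := by
  rw [List.find?_eq_none]
  intro x hx
  simp at hx
  subst hx
  simpa [List.isPrefixOf_iff_prefix] using h

-- One str.replace pass IS the singleton-table scan.
theorem replace_go_acc (old new : List Char) (fuel : Nat) :
    ∀ (l acc : List Char), PySem.Chars.replace.go old new fuel l acc
      = acc.reverse ++ PySem.Chars.replace.go old new fuel l [] := by
  induction fuel with
  | zero => intro l acc; simp [PySem.Chars.replace.go]
  | succ n ih =>
    intro l acc
    cases l with
    | nil => simp [PySem.Chars.replace.go]
    | cons c t =>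
      rw [PySem.Chars.replace.go, PySem.Chars.replace.go]
      by_cases h : old.isPrefixOf (c :: t) = true
      · rw [if_pos h, if_pos h, ih _ (new.reverse ++ acc), ih _ (new.reverse ++ [])]
        simp
      · rw [if_neg h, if_neg h, ih t (c :: acc), ih t (c :: [])]
        simp

theorem replace_go_eq_scan (old new : List Char) (hold : old ≠ []) (fuel : Nat) :
    ∀ (l : List Char), l.length ≤ fuel →
      PySem.Chars.replace.go old new fuel l [] = pvScan [(old, new)] l := by
  induction fuel with
  | zero =>
    intro l hl
    have : l = [] := List.length_eq_zero_iff.mp (Nat.le_zero.mp hl)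
    subst this
    simp [PySem.Chars.replace.go, pvScan_nil]
  | succ n ih =>
    intro l hl
    cases l with
    | nil => simp [PySem.Chars.replace.go, pvScan_nil]
    | cons c t =>
      rw [PySem.Chars.replace.go]
      by_cases h : old.isPrefixOf (c :: t) = true
      · have hpre : old <+: (c :: t) := List.isPrefixOf_iff_prefix.mp h
        have hlen : (List.drop old.length (c :: t)).length ≤ n := by
          have hop : 0 < old.length := List.length_pos_iff.mpr hold
          simp only [List.length_cons] at hl
          simp only [List.length_drop, List.length_cons]
          omega
        rw [if_pos h, replace_go_acc, ih _ hlen,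
            pvScan_cons_some _ c t (old, new) (find?_singleton_pos old new _ hpre) hold]
        simp
      · have hlen : t.length ≤ n := by simp only [List.length_cons] at hl; omega
        rw [if_neg h, replace_go_acc, ih t hlen,
            pvScan_cons_none _ c t (find?_singleton_neg old new _
              (fun hp => h (List.isPrefixOf_iff_prefix.mpr hp)))]
        simp

theorem replace_eq_scan (old new l : List Char) (hold : old ≠ []) :
    PySem.Chars.replace l old new = pvScan [(old, new)] l := by
  rw [PySem.Chars.replace, if_neg (by simp [List.isEmpty_iff, hold])]
  exact replace_go_eq_scan old new hold l.length l (le_refl _)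

-- Scanning copies a segment containing no '&' (no entity can start there).
theorem scan_amp_free (T : List (List Char × List Char))
    (hT : ∀ pv ∈ T, pv.1.head? = some '&') :
    ∀ (u Y : List Char), '&' ∉ u → pvScan T (u ++ Y) = u ++ pvScan T Y := by
  intro u
  induction u with
  | nil => intro Y _; simp
  | cons a u' ih =>
    intro Y hu
    have hfind : T.find? (fun p => p.1.isPrefixOf (a :: (u' ++ Y))) = none := by
      rw [List.find?_eq_none]
      intro pv hpv hpre
      have hhead := hT pv hpv
      have hpre' : pv.1 <+: a :: (u' ++ Y) := List.isPrefixOf_iff_prefix.mp hpre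
      cases hp1 : pv.1 with
      | nil => rw [hp1] at hhead; simp at hhead
      | cons b bs =>
        rw [hp1] at hhead hpre'
        simp at hhead
        obtain ⟨hba, _⟩ := List.cons_prefix_cons.mp hpre'
        have ha : a = '&' := hba ▸ hhead
        exact hu (by rw [ha]; exact List.mem_cons_self)
    rw [List.cons_append, pvScan_cons_none T a (u' ++ Y) hfind,
        ih Y (fun hm => hu (List.mem_cons_of_mem _ hm))]
    simp

-- A prefix that avoids the replacement characters passes through a singleton scan unchanged.
theorem prefix_through_scan (old new : List Char) (hold : old ≠ []) (hnew : new ≠ [])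
    (s : List Char) (hs : ∀ c ∈ s, c ∉ new) :
    ∀ (l : List Char), s <+: pvScan [(old, new)] l → s <+: l := by
  intro l
  induction hn : l.length using Nat.strong_induction_on generalizing l s with
  | _ n ih =>
  subst hn
  cases l with
  | nil =>
    rw [pvScan_nil]
    intro h
    simpa using h
  | cons c t =>
    intro hpre
    by_cases h : old <+: (c :: t)
    · rw [pvScan_cons_some _ c t (old, new) (find?_singleton_pos old new _ h) hold] at hpre
      cases s with
      | nil => exact List.nil_prefix
      | cons a s' =>
        exfalso
        cases hnw : new with
        | nil => exact hnew hnw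
        | cons b bs =>
          rw [hnw] at hpre
          obtain ⟨hab, _⟩ := List.cons_prefix_cons.mp (by simpa using hpre)
          exact hs a List.mem_cons_self (by rw [hnw, hab]; exact List.mem_cons_self)
    · rw [pvScan_cons_none _ c t (find?_singleton_neg old new _ h)] at hpre
      cases s with
      | nil => exact List.nil_prefix
      | cons a s' =>
        obtain ⟨hac, hs'⟩ := List.cons_prefix_cons.mp hpre
        have := ih t.length (by simp) s' (fun ch hch => hs ch (List.mem_cons_of_mem _ hch)) t rfl hs'
        exact List.cons_prefix_cons.mpr ⟨hac, this⟩

-- Scanning copies a region where the pattern matches nowhere.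
theorem scan_skip (old new : List Char) :
    ∀ (u v : List Char), (∀ j, j < u.length → ¬ old <+: List.drop j (u ++ v)) →
      pvScan [(old, new)] (u ++ v) = u ++ pvScan [(old, new)] v := by
  intro u
  induction u with
  | nil => intro v _; simp
  | cons a u' ih =>
    intro v h
    have h0 : ¬ old <+: (a :: (u' ++ v)) := by simpa using h 0 (by simp)
    rw [List.cons_append, pvScan_cons_none _ a (u' ++ v) (find?_singleton_neg old new _ h0),
        ih v (fun j hj => by simpa using h (j + 1) (by simp; omega))]
    simp

-- A first match survives replacing the predicate by a weaker one it still satisfies.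
theorem find?_eq_of_imp {α : Type} (T : List α) (p q : α → Bool) (r : α)
    (h : T.find? p = some r) (hq : q r = true)
    (himp : ∀ e ∈ T, q e = true → p e = true) : T.find? q = some r := by
  induction T with
  | nil => simp at h
  | cons e T ih =>
    by_cases hpe : p e = true
    · rw [List.find?_cons_of_pos hpe] at h
      obtain rfl := Option.some.inj h
      exact List.find?_cons_of_pos hq
    · rw [List.find?_cons_of_neg (by simpa using hpe)] at h
      have hqe : ¬ q e = true := fun hqe => hpe (himp e List.mem_cons_self hqe)
      rw [List.find?_cons_of_neg (by simpa using hqe)]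
      exact ih h (fun e' he' hq' => himp e' (List.mem_cons_of_mem _ he') hq')

-- KEY LEMMA: one replace pass followed by the scan of the rest = the scan of the whole table.
theorem scan_compose (t : List Char × List Char) (R : List (List Char × List Char))
    (hG : pvGoodTable (t :: R)) :
    ∀ (l : List Char), pvScan R (pvScan [t] l) = pvScan (t :: R) l := by
  obtain ⟨h1, h2⟩ := hG
  obtain ⟨ht1, ht2, ht3, ht4, ht5⟩ := h1 t List.mem_cons_self
  have hRhead : ∀ pv ∈ R, pv.1.head? = some '&' := fun pv hpv =>
    (h1 pv (List.mem_cons_of_mem _ hpv)).2.1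
  have hRne : ∀ pv ∈ R, pv.1 ≠ [] := fun pv hpv => (h1 pv (List.mem_cons_of_mem _ hpv)).1
  have hamp_t2 : '&' ∉ t.2 := by
    intro hm
    have hmem : '&' ∈ t.1 := by
      cases hp : t.1 with
      | nil => exact absurd hp ht1
      | cons b bs =>
        rw [hp] at ht2
        simp at ht2
        rw [ht2]
        exact List.mem_cons_self
    exact ht5 '&' hm t List.mem_cons_self hmem
  intro l
  induction hn : l.length using Nat.strong_induction_on generalizing l with
  | _ n ih =>
  subst hn
  cases l with
  | nil => simp [pvScan_nil]
  | cons c tl =>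
    by_cases hmt : t.1 <+: (c :: tl)
    · -- t matches first: both sides emit t.2 and continue after it.
      have hs1 : pvScan [t] (c :: tl) = t.2 ++ pvScan [t] (List.drop t.1.length (c :: tl)) := by
        have hf : [t].find? (fun p => p.1.isPrefixOf (c :: tl)) = some t := by
          cases t
          exact find?_singleton_pos _ _ _ hmt
        exact pvScan_cons_some [t] c tl t hf ht1
      have hfull : (t :: R).find? (fun p => p.1.isPrefixOf (c :: tl)) = some t :=
        List.find?_cons_of_pos (by simpa [List.isPrefixOf_iff_prefix] using hmt)
      have hdlen : (List.drop t.1.length (c :: tl)).length < (c :: tl).length := by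
        have : 0 < t.1.length := List.length_pos_iff.mpr ht1
        simp only [List.length_drop, List.length_cons]
        omega
      rw [hs1, scan_amp_free R hRhead t.2 _ hamp_t2,
          ih (List.drop t.1.length (c :: tl)).length hdlen _ rfl,
          pvScan_cons_some (t :: R) c tl t hfull ht1]
    · have hmt' : t.1.isPrefixOf (c :: tl) = false :=
        Bool.eq_false_iff.mpr (fun hp => hmt (List.isPrefixOf_iff_prefix.mp hp))
      have hfull : (t :: R).find? (fun p => p.1.isPrefixOf (c :: tl))
          = R.find? (fun p => p.1.isPrefixOf (c :: tl)) :=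
        List.find?_cons_of_neg (by simp [hmt'])
      cases hr : R.find? (fun p => p.1.isPrefixOf (c :: tl)) with
      | some r =>
        -- some later entity r matches here: the t-pass copies it untouched.
        have hrR : r ∈ R := List.mem_of_find?_eq_some hr
        have hrpre : r.1 <+: (c :: tl) := List.isPrefixOf_iff_prefix.mp (by simpa using List.find?_some hr)
        have hrne : r.1 ≠ [] := hRne r hrR
        obtain ⟨hr1, hr2, hr3, hr4, hr5⟩ := h1 r (List.mem_cons_of_mem _ hrR)
        obtain ⟨v, hv⟩ := hrpre
        -- t.1 matches nowhere inside r.1: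
        have hnomatch : ∀ j, j < r.1.length → ¬ t.1 <+: List.drop j (r.1 ++ v) := by
          intro j hj hcon
          rcases Nat.eq_zero_or_pos j with rfl | hjpos
          · rw [List.drop_zero, hv] at hcon
            exact hmt hcon
          · have hth : t.1.head? = ((r.1 ++ v).drop j).head? := by
              obtain ⟨w, hw⟩ := hcon
              rw [← hw]
              cases hp : t.1 with
              | nil => exact absurd hp ht1
              | cons b bs => simp
            rw [List.head?_drop, List.getElem?_append_left hj, ht2] at hth
            have hidx : r.1[j]? = some '&' := hth.symm
            obtain ⟨j', rfl⟩ : ∃ j', j = j' + 1 := ⟨j - 1, by omega⟩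
            apply hr3
            cases hp : r.1 with
            | nil => exact absurd hp hrne
            | cons b bs =>
              rw [hp, List.getElem?_cons_succ] at hidx
              simpa using List.mem_of_getElem? hidx
        have hsplit : pvScan [t] (c :: tl) = r.1 ++ pvScan [t] v := by
          rw [← hv]
          cases t
          exact scan_skip _ _ r.1 v hnomatch
        -- find? R on (r.1 ++ Y) is still r, for any continuation Y:
        have hfindRY : ∀ Y, R.find? (fun p => p.1.isPrefixOf (r.1 ++ Y)) = some r := by
          intro Y
          apply find?_eq_of_imp R _ _ r hr
          · simpa [List.isPrefixOf_iff_prefix] using List.prefix_append r.1 Y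
          · intro e he hq
            have hq' : e.1 <+: r.1 ++ Y := List.isPrefixOf_iff_prefix.mp hq
            have hcmp : e.1 <+: r.1 ∨ r.1 <+: e.1 := by
              rcases Nat.le_total e.1.length r.1.length with hle | hle
              · exact Or.inl (List.prefix_of_prefix_length_le hq' (List.prefix_append r.1 Y) hle)
              · exact Or.inr (List.prefix_of_prefix_length_le (List.prefix_append r.1 Y) hq' hle)
            have heq : e.1 = r.1 := by
              rcases hcmp with hc | hc
              · exact h2 e (List.mem_cons_of_mem _ he) r (List.mem_cons_of_mem _ hrR) hc
              · exact (h2 r (List.mem_cons_of_mem _ hrR) e (List.mem_cons_of_mem _ he) hc).symm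
            rw [List.isPrefixOf_iff_prefix, heq]
            exact ⟨v, hv⟩
        have hvlen : v.length < (c :: tl).length := by
          have hpos : 0 < r.1.length := List.length_pos_iff.mpr hrne
          have hlen := congrArg List.length hv
          simp only [List.length_append, List.length_cons] at hlen
          simp only [List.length_cons]
          omega
        have hYne : pvScan R (r.1 ++ pvScan [t] v) = r.2 ++ pvScan R (pvScan [t] v) := by
          have hrne' : r.1 ++ pvScan [t] v ≠ [] := by
            cases hp : r.1 with
            | nil => exact absurd hp hrne
            | cons b bs => simp
          rw [pvScan_some R _ r hrne' (hfindRY _) hrne, List.drop_left]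
        rw [hsplit, hYne, ih v.length hvlen v rfl,
            pvScan_cons_some (t :: R) c tl r (hfull.trans hr) hrne, ← hv, List.drop_left]
      | none =>
        -- nothing matches here: both scans copy c.
        have hs1 : pvScan [t] (c :: tl) = c :: pvScan [t] tl := by
          cases t
          exact pvScan_cons_none _ c tl (find?_singleton_neg _ _ _ hmt)
        have hfindnone : R.find? (fun p => p.1.isPrefixOf (c :: pvScan [t] tl)) = none := by
          rw [List.find?_eq_none]
          intro e he hq
          have hq' : e.1 <+: pvScan [t] (c :: tl) := by
            rw [hs1]
            exact List.isPrefixOf_iff_prefix.mp hq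
          have hdisj : ∀ ch ∈ e.1, ch ∉ t.2 := fun ch hch hch2 =>
            ht5 ch hch2 e (List.mem_cons_of_mem _ he) hch
          have hpl : e.1 <+: (c :: tl) :=
            prefix_through_scan t.1 t.2 ht1 ht4 e.1 hdisj (c :: tl) hq'
          rw [List.find?_eq_none] at hr
          exact hr e he (by simpa [List.isPrefixOf_iff_prefix] using hpl)
        rw [hs1, pvScan_cons_none R c _ hfindnone, ih tl.length (by simp) tl rfl,
            pvScan_cons_none (t :: R) c tl (by rw [hfull, hr])]

-- A's fold of replaces = B's one scan, for any good table.
theorem foldl_replace_eq_scan (T : List (List Char × List Char)) :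
    pvGoodTable T → ∀ (l : List Char),
      T.foldl (fun s p => PySem.Chars.replace s p.1 p.2) l = pvScan T l := by
  induction T with
  | nil => intro _ l; simp [pvScan_nil_table]
  | cons t R ih =>
    intro hG l
    have ht1 : t.1 ≠ [] := (hG.1 t List.mem_cons_self).1
    rw [List.foldl_cons, replace_eq_scan t.1 t.2 l ht1, ih (pvGoodTable_tail t R hG) _]
    exact scan_compose t R hG l

-- Bridge: A's String-level fold computes the Char-level fold.
theorem toList_foldl_replace : ∀ (L : List (String × String)) (s : String),
    (L.foldl (fun s p => PySem.Str.replace s p.1 p.2) s).toList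
      = L.foldl (fun l p => PySem.Chars.replace l p.1.toList p.2.toList) s.toList := by
  intro L
  induction L with
  | nil => intro s; simp
  | cons p L ih =>
    intro s
    rw [List.foldl_cons, List.foldl_cons, ih, PySem.Str.toList_replace]

set_option maxRecDepth 10000 in
theorem items_map_toList :
    pvReplacements.items.map (fun p => (p.1.toList, p.2.toList)) = pvTable := by decide

-- ===== VERDICT (by name: the statement is the Claim_ definition above) =====
theorem html_entities_to_unicode_spec : Claim_equal_html_entities_to_unicode := by
  intro html _
  unfold Spec_html_entities_to_unicode html_entities_to_unicode html_entities_to_unicode_alt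
  apply String.toList_inj.mp
  rw [String.toList_ofList, toList_foldl_replace]
  have hmap := List.foldl_map (f := fun p : String × String => (p.1.toList, p.2.toList))
    (g := fun l (p : List Char × List Char) => PySem.Chars.replace l p.1 p.2)
    (l := pvReplacements.items) (init := html.toList)
  rw [items_map_toList] at hmap
  rw [← hmap]
  exact foldl_replace_eq_scan pvTable pvGoodTable_pvTable html.toList
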